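-- pv_equiv track=rewrite | github.com/Natkuma01/DSA_ProblemSet | Unit4/Version1.py | bouncy_flouncy_trouncy_pouncy
-- ===== SOURCE A (Python) =====
-- def bouncy_flouncy_trouncy_pouncy(operations):
--     tigger = 1
--     for word in operations:
--         if word == "bouncy" or word == "flouncy":
--             tigger += 1
--         else:
--             tigger -= 1
--     return tigger
-- ===== SOURCE B (Python) =====
-- def bouncy_flouncy_trouncy_pouncy(operations):
--     up = operations.count("bouncy") + operations.count("flouncy")
--     return 1 + 2 * up - len(operations)
-- ===== Notes on version B (the rewrite author's own statement) =====
-- stated objective: simpler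
-- what changed: Replaces the per-word +1/-1 accumulator loop with two count() calls and a closed-form 1 + 2*up - len(operations).
import Mathlib
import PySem

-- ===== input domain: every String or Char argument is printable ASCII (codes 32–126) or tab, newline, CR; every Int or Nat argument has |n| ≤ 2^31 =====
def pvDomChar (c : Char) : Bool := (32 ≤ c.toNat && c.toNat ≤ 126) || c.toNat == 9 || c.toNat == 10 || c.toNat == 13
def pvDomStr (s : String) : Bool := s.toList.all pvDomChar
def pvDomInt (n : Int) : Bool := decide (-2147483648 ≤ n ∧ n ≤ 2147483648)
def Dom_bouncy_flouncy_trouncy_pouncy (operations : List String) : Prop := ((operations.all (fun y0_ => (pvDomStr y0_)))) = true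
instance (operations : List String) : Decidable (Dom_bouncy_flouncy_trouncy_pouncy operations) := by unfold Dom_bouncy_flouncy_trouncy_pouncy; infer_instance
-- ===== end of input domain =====

-- B replaces A's per-word +1/-1 accumulator loop with two counts and a closed-form formula (objective: simpler).


-- ===== PORT A =====
def bouncy_flouncy_trouncy_pouncy (operations : List String) : Int :=
  operations.foldl (fun tigger word =>
    if word == "bouncy" || word == "flouncy" then tigger + 1 else tigger - 1) 1

-- ===== PORT B =====
def bouncy_flouncy_trouncy_pouncy_alt (operations : List String) : Int :=
  let up : Int := PySem.List.count operations "bouncy" + PySem.List.count operations "flouncy"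
  1 + 2 * up - operations.length

-- ===== PRECONDITION & SPEC =====
def Spec_bouncy_flouncy_trouncy_pouncy (operations : List String) (out : Int) : Prop := out = bouncy_flouncy_trouncy_pouncy_alt operations
instance (operations : List String) (out : Int) : Decidable (Spec_bouncy_flouncy_trouncy_pouncy operations out) := by unfold Spec_bouncy_flouncy_trouncy_pouncy; infer_instance

-- ===== CLAIM (what is proved, stated in full; the proofs are below) =====
def Claim_equal_bouncy_flouncy_trouncy_pouncy : Prop := ∀ (operations : List String), Dom_bouncy_flouncy_trouncy_pouncy operations → Spec_bouncy_flouncy_trouncy_pouncy operations (bouncy_flouncy_trouncy_pouncy operations)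

-- ===== LEMMAS AND PROOFS =====

-- ===== VERDICT (by name: the statement is the Claim_ definition above) =====
theorem pv_fold_shift (operations : List String) (t : Int) :
    operations.foldl (fun tigger word =>
      if word == "bouncy" || word == "flouncy" then tigger + 1 else tigger - 1) t
      = t + 2 * (PySem.List.count operations "bouncy" + PySem.List.count operations "flouncy")
          - operations.length := by
  induction operations generalizing t with
  | nil => simp [PySem.List.count]
  | cons h tl ih =>
      rw [List.foldl_cons, ih]
      by_cases hb : h = "bouncy" <;> by_cases hf : h = "flouncy" <;>
        simp [hb, hf, PySem.List.count, List.count] <;> omega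

theorem bouncy_flouncy_trouncy_pouncy_spec : Claim_equal_bouncy_flouncy_trouncy_pouncy := by
  intro operations _
  unfold Spec_bouncy_flouncy_trouncy_pouncy bouncy_flouncy_trouncy_pouncy bouncy_flouncy_trouncy_pouncy_alt
  rw [pv_fold_shift]
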